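-- pv_equiv track=rewrite | github.com/pc5401/my_BOJ | 백준/Bronze/3234. LUKA/LUKA.py | solve
-- ===== SOURCE A (Python) =====
-- def solve(X, Y, K, route):
--     result = []
--     x, y = 0, 0
--     # 시간 0
--     if abs(x - X) <= 1 and abs(y - Y) <= 1:
--         result.append("0")
--     for i in range(K):
--         ch = route[i]
--         if ch == 'I':
--             x += 1
--         elif ch == 'S':
--             y += 1
--         elif ch == 'Z':
--             x -= 1
--         elif ch == 'J':
--             y -= 1
--         if abs(x - X) <= 1 and abs(y - Y) <= 1:
--             result.append(str(i + 1))
--     if not result: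
--         result.append("-1")
--     return result
-- ===== SOURCE B (Python) =====
-- def solve(X, Y, K, route):
--     # Decompose the 2D nearness test per axis: the x-coordinate depends only on
--     # 'I'/'Z' steps and the y-coordinate only on 'S'/'J' steps, so solve two
--     # independent 1D problems (the times each axis is within 1 of its target)
--     # and intersect the two hit-time sets.
--     steps = route[:max(K, 0)]
--
--     def axis_hits(up, down, target):
--         hits = []
--         v = 0
--         if abs(v - target) <= 1:
--             hits.append(0)
--         for t, ch in enumerate(steps, 1):
--             v += (ch == up) - (ch == down)
--             if abs(v - target) <= 1:
--                 hits.append(t)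
--         return hits
--
--     ty = set(axis_hits('S', 'J', Y))
--     out = [str(t) for t in axis_hits('I', 'Z', X) if t in ty]
--     return out or ["-1"]
-- ===== Notes on version B (the rewrite author's own statement) =====
-- stated objective: alternative
-- what changed: Instead of one walk that updates (x,y) and checks the 2D box at every step, B decomposes the problem per axis: x depends only on 'I'/'Z' and y only on 'S'/'J', so it solves two independent 1D problems (the hit-time list of each axis) and intersects the two time sets.
import Mathlib
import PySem

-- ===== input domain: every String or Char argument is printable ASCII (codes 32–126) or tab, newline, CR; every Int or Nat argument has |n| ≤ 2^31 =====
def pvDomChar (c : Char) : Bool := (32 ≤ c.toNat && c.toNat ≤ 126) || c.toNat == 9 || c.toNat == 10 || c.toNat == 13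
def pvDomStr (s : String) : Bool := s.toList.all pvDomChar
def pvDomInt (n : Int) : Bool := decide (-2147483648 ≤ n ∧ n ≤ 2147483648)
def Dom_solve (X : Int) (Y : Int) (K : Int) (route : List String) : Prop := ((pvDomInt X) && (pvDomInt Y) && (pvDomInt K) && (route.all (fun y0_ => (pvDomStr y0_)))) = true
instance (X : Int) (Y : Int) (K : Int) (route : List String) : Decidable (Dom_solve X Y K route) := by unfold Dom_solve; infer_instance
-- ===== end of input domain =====

-- B decomposes the 2D nearness test per axis (x depends only on 'I'/'Z', y only on 'S'/'J'):
-- it computes each axis's hit-time list independently and intersects the two time sets,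
-- instead of A's single walk that updates (x,y) and checks the 2D box at every step.

-- ===== PORT A =====
def solve (X : Int) (Y : Int) (K : Int) (route : List String) : List String :=
  let x : Int := 0
  let y : Int := 0
  let result : List String :=
    if (x - X).natAbs ≤ 1 ∧ (y - Y).natAbs ≤ 1 then ([] : List String) ++ ["0"] else []
  let st := (PySem.List.pyRange 0 K 1).foldl
    (fun (st : List String × Int × Int) i =>
      match PySem.List.pyGet? route i with
      | none => st   -- IndexError: excluded by Pre_solve
      | some ch =>
        let p : Int × Int :=
          if ch = "I" then (st.2.1 + 1, st.2.2)
          else if ch = "S" then (st.2.1, st.2.2 + 1)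
          else if ch = "Z" then (st.2.1 - 1, st.2.2)
          else if ch = "J" then (st.2.1, st.2.2 - 1)
          else (st.2.1, st.2.2)
        let result := if (p.1 - X).natAbs ≤ 1 ∧ (p.2 - Y).natAbs ≤ 1
          then st.1 ++ [PySem.Int.toStr (i + 1)] else st.1
        (result, p))
    (result, x, y)
  if st.1 = [] then st.1 ++ ["-1"] else st.1

-- ===== PORT B =====
-- Source B's inner 'axis_hits': the times 0..len(steps) at which one axis is within 1 of its target
def pvAxisHits (steps : List String) (up down : String) (target : Int) : List Int :=
  let hits : List Int := if ((0 : Int) - target).natAbs ≤ 1 then ([] : List Int) ++ [0] else []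
  ((PySem.List.enumerate steps 1).foldl
    (fun (st : List Int × Int) tch =>
      let v := st.2 + (if tch.2 = up then (1 : Int) else 0) - (if tch.2 = down then (1 : Int) else 0)
      (if (v - target).natAbs ≤ 1 then st.1 ++ [tch.1] else st.1, v))
    (hits, 0)).1

def solve_alt (X : Int) (Y : Int) (K : Int) (route : List String) : List String :=
  let steps := PySem.List.slice route none (some (max K 0))
  let ty : PySem.Set Int := PySem.Set.ofList (pvAxisHits steps "S" "J" Y)
  let out := (pvAxisHits steps "I" "Z" X).filterMap
    (fun t => if PySem.Set.contains ty t then some (PySem.Int.toStr t) else none)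
  if out = [] then ["-1"] else out

-- ===== PRECONDITION & SPEC =====
-- A raises IndexError (route[i]) exactly when K exceeds the number of route entries.
def Pre_solve (X : Int) (Y : Int) (K : Int) (route : List String) : Prop :=
  K ≤ (route.length : Int)
instance (X : Int) (Y : Int) (K : Int) (route : List String) : Decidable (Pre_solve X Y K route) := by unfold Pre_solve; infer_instance

def pvWitness_solve : Int × Int × Int × List String := (1, 0, 3, ["I", "S", "Z"])

def Spec_solve (X : Int) (Y : Int) (K : Int) (route : List String) (out : List String) : Prop := out = solve_alt X Y K route
instance (X : Int) (Y : Int) (K : Int) (route : List String) (out : List String) : Decidable (Spec_solve X Y K route out) := by unfold Spec_solve; infer_instance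

-- ===== CLAIM (what is proved, stated in full; the proofs are below) =====
def Claim_equal_solve : Prop := ∀ (X : Int) (Y : Int) (K : Int) (route : List String), Dom_solve X Y K route → Pre_solve X Y K route → Spec_solve X Y K route (solve X Y K route)

-- ===== LEMMAS AND PROOFS =====

-- A's branch-chain position update.
def pvStep (p : Int × Int) (ch : String) : Int × Int :=
  if ch = "I" then (p.1 + 1, p.2)
  else if ch = "S" then (p.1, p.2 + 1)
  else if ch = "Z" then (p.1 - 1, p.2)
  else if ch = "J" then (p.1, p.2 - 1)
  else (p.1, p.2)

-- the positions after each step, starting from p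
def pvTraj (p : Int × Int) : List String → List (Int × Int)
  | [] => []
  | ch :: L => pvStep p ch :: pvTraj (pvStep p ch) L

-- A's hit times over a 2D position list starting at time s
def pvHits (X Y : Int) (s : Int) : List (Int × Int) → List String
  | [] => []
  | p :: ps => (if (p.1 - X).natAbs ≤ 1 ∧ (p.2 - Y).natAbs ≤ 1
      then [PySem.Int.toStr s] else []) ++ pvHits X Y (s + 1) ps

-- B's single-axis update
def aStep (up down : String) (v : Int) (ch : String) : Int :=
  v + (if ch = up then 1 else 0) - (if ch = down then 1 else 0)

-- the single-axis values after each step, starting from v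
def aTraj (up down : String) (v : Int) : List String → List Int
  | [] => []
  | ch :: L => aStep up down v ch :: aTraj up down (aStep up down v ch) L

-- single-axis hit times over a value list starting at time s
def aHits (target s : Int) : List Int → List Int
  | [] => []
  | v :: vs => (if (v - target).natAbs ≤ 1 then [s] else []) ++ aHits target (s + 1) vs

theorem aTraj_length (up down : String) (v : Int) (L : List String) :
    (aTraj up down v L).length = L.length := by
  induction L generalizing v with
  | nil => rfl
  | cons ch L ih => simp [aTraj, ih]

theorem pvStep_pair (p : Int × Int) (ch : String) :
    pvStep p ch = (aStep "I" "Z" p.1 ch, aStep "S" "J" p.2 ch) := by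
  by_cases h1 : ch = "I"
  · simp [pvStep, aStep, h1]
  · by_cases h2 : ch = "S"
    · simp [pvStep, aStep, h1, h2]
    · by_cases h3 : ch = "Z"
      · simp [pvStep, aStep, h2, h3]
      · by_cases h4 : ch = "J"
        · simp [pvStep, aStep, h2, h3, h4]
        · simp [pvStep, aStep, h1, h2, h3, h4]

theorem pvTraj_zip (p : Int × Int) (L : List String) :
    pvTraj p L = (aTraj "I" "Z" p.1 L).zip (aTraj "S" "J" p.2 L) := by
  induction L generalizing p with
  | nil => rfl
  | cons ch L ih =>
    simp only [pvTraj, aTraj, List.zip_cons_cons, ← pvStep_pair]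
    rw [ih (pvStep p ch), pvStep_pair]

-- B's per-axis fold equals the structural aHits of the axis trajectory
theorem pvFoldAxis (up down : String) (target : Int) (L : List String) (s : Int)
    (acc : List Int) (v : Int) :
    ((PySem.List.enumerate L s).foldl
      (fun (st : List Int × Int) tch =>
        let w := st.2 + (if tch.2 = up then (1 : Int) else 0) - (if tch.2 = down then (1 : Int) else 0)
        (if (w - target).natAbs ≤ 1 then st.1 ++ [tch.1] else st.1, w))
      (acc, v)).1
    = acc ++ aHits target s (aTraj up down v L) := by
  induction L generalizing s acc v with
  | nil => simp [PySem.List.enumerate_nil, aTraj, aHits]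
  | cons ch L ih =>
    rw [PySem.List.enumerate_cons]
    simp only [List.foldl_cons]
    rw [ih]
    simp only [aTraj, aHits, aStep]
    by_cases h : (v + (if ch = up then (1 : Int) else 0) - (if ch = down then (1 : Int) else 0) - target).natAbs ≤ 1 <;>
      simp [h]

theorem pvAxisHits_eq (steps : List String) (up down : String) (target : Int) :
    pvAxisHits steps up down target = aHits target 0 (0 :: aTraj up down 0 steps) := by
  unfold pvAxisHits
  rw [pvFoldAxis]
  simp only [aHits]
  by_cases h : ((0 : Int) - target).natAbs ≤ 1 <;> simp [h]

theorem mem_aHits_le (target s t : Int) (vs : List Int) (h : t ∈ aHits target s vs) : s ≤ t := by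
  induction vs generalizing s with
  | nil => simp [aHits] at h
  | cons v vs ih =>
    simp only [aHits, List.mem_append] at h
    rcases h with h | h
    · split at h <;> simp at h; omega
    · have := ih (s + 1) h; omega

-- the intersected, stringified hit list is A's 2D hit list
theorem pvFilterInter (X Y : Int) (s : Int) (xs ys : List Int) (h : xs.length = ys.length) :
    (aHits X s xs).filterMap
      (fun t => if t ∈ aHits Y s ys then some (PySem.Int.toStr t) else none)
    = pvHits X Y s (xs.zip ys) := by
  induction xs generalizing ys s with
  | nil => cases ys with
    | nil => rfl
    | cons y ys => simp at h
  | cons x xs ih =>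
    cases ys with
    | nil => simp at h
    | cons y ys =>
      simp only [List.length_cons, Nat.add_right_cancel_iff] at h
      have hmem : ∀ t, t ∈ aHits Y s (y :: ys) ↔
          ((y - Y).natAbs ≤ 1 ∧ t = s) ∨ t ∈ aHits Y (s + 1) ys := by
        intro t
        simp only [aHits, List.mem_append]
        constructor
        · rintro (ht | ht)
          · split at ht <;> simp at ht
            · exact Or.inl ⟨by assumption, ht⟩
          · exact Or.inr ht
        · rintro (⟨hy, rfl⟩ | ht)
          · exact Or.inl (by simp [hy])
          · exact Or.inr ht
      have htail : (aHits X (s + 1) xs).filterMap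
          (fun t => if t ∈ aHits Y s (y :: ys) then some (PySem.Int.toStr t) else none)
          = (aHits X (s + 1) xs).filterMap
          (fun t => if t ∈ aHits Y (s + 1) ys then some (PySem.Int.toStr t) else none) := by
        apply List.filterMap_congr
        intro t ht
        have hst : s + 1 ≤ t := mem_aHits_le X (s + 1) t xs ht
        have : (t ∈ aHits Y s (y :: ys)) ↔ (t ∈ aHits Y (s + 1) ys) := by
          rw [hmem]
          constructor
          · rintro (⟨_, rfl⟩ | h') <;> [omega; exact h']
          · exact Or.inr
        simp only [this]
      have hX : aHits X s (x :: xs)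
          = (if (x - X).natAbs ≤ 1 then [s] else []) ++ aHits X (s + 1) xs := rfl
      have hR : pvHits X Y s ((x, y) :: xs.zip ys)
          = (if (x - X).natAbs ≤ 1 ∧ (y - Y).natAbs ≤ 1 then [PySem.Int.toStr s] else [])
            ++ pvHits X Y (s + 1) (xs.zip ys) := rfl
      rw [List.zip_cons_cons, hX, List.filterMap_append, htail, ih (s + 1) ys h, hR]
      congr 1
      by_cases hx : (x - X).natAbs ≤ 1
      · by_cases hy : (y - Y).natAbs ≤ 1
        · have : s ∈ aHits Y s (y :: ys) := by rw [hmem]; exact Or.inl ⟨hy, rfl⟩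
          simp [hx, hy, this]
        · have : s ∉ aHits Y s (y :: ys) := by
            rw [hmem]
            rintro (⟨h', _⟩ | h')
            · exact hy h'
            · have := mem_aHits_le Y (s + 1) s ys h'; omega
          simp [hx, hy, this]
      · simp [hx]

-- A's main fold equals pvHits of the trajectory (proved by induction over the range)
theorem pvFoldA (X Y : Int) (xs : List String) (k t : Nat) (res : List String) (p : Int × Int)
    (hlen : t + k ≤ xs.length) :
    ∃ q, (PySem.List.pyRange (t : Int) ((t : Int) + (k : Int)) 1).foldl
      (fun (st : List String × Int × Int) i =>
        match PySem.List.pyGet? xs i with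
        | none => st
        | some ch =>
          let p : Int × Int :=
            if ch = "I" then (st.2.1 + 1, st.2.2)
            else if ch = "S" then (st.2.1, st.2.2 + 1)
            else if ch = "Z" then (st.2.1 - 1, st.2.2)
            else if ch = "J" then (st.2.1, st.2.2 - 1)
            else (st.2.1, st.2.2)
          let result := if (p.1 - X).natAbs ≤ 1 ∧ (p.2 - Y).natAbs ≤ 1
            then st.1 ++ [PySem.Int.toStr (i + 1)] else st.1
          (result, p)) (res, p)
      = (res ++ pvHits X Y ((t : Int) + 1) (pvTraj p ((xs.drop t).take k)), q) := by
  induction k generalizing t res p with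
  | zero =>
    refine ⟨p, ?_⟩
    rw [show ((t : Int) + (0 : Nat) : Int) = (t : Int) by push_cast; ring,
        PySem.List.pyRange_one_eq_nil le_rfl]
    simp [pvTraj, pvHits]
  | succ k ih =>
    have ht : t < xs.length := by omega
    rw [PySem.List.pyRange_one_cons (by push_cast; omega)]
    simp only [List.foldl_cons]
    have hget : PySem.List.pyGet? xs (t : Int) = some xs[t] := by
      rw [PySem.List.pyGet?_natCast]
      simp [ht]
    rw [hget]
    have hdrop : xs.drop t = xs[t] :: xs.drop (t + 1) := List.drop_eq_getElem_cons ht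
    set ch := xs[t] with hch
    set p' := pvStep p ch with hp'
    have hbody : (if ch = "I" then (p.1 + 1, p.2)
        else if ch = "S" then (p.1, p.2 + 1)
        else if ch = "Z" then (p.1 - 1, p.2)
        else if ch = "J" then (p.1, p.2 - 1)
        else (p.1, p.2)) = p' := by rw [hp']; rfl
    have hrange : PySem.List.pyRange ((t : Int) + 1) ((t : Int) + ((k : Nat) + 1 : Nat)) 1
        = PySem.List.pyRange ((t + 1 : Nat) : Int) (((t + 1 : Nat) : Int) + (k : Int)) 1 := by
      congr 1 <;> push_cast <;> ring
    obtain ⟨q, hq⟩ := ih (t + 1)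
      (res ++ if (p'.1 - X).natAbs ≤ 1 ∧ (p'.2 - Y).natAbs ≤ 1
        then [PySem.Int.toStr ((t : Int) + 1)] else [])
      p' (by omega)
    refine ⟨q, ?_⟩
    simp only [hbody]
    rw [hrange]
    calc _ = (PySem.List.pyRange ((t + 1 : Nat) : Int) (((t + 1 : Nat) : Int) + (k : Int)) 1).foldl _
            ((res ++ if (p'.1 - X).natAbs ≤ 1 ∧ (p'.2 - Y).natAbs ≤ 1
              then [PySem.Int.toStr ((t : Int) + 1)] else []), p') := by
              congr 1
              by_cases h : (p'.1 - X).natAbs ≤ 1 ∧ (p'.2 - Y).natAbs ≤ 1 <;> simp [h]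
        _ = _ := by
              rw [hq, hdrop]
              simp only [List.take_succ_cons, pvTraj, ← hp', pvHits]
              rw [List.append_assoc, show ((t + 1 : Nat) : Int) + 1 = (t : Int) + 1 + 1 by push_cast; ring]

-- B's whole hit list equals A's whole hit list (before the sentinel)
theorem pvB_hits (X Y : Int) (steps : List String) :
    (pvAxisHits steps "I" "Z" X).filterMap
      (fun t => if PySem.Set.contains (PySem.Set.ofList (pvAxisHits steps "S" "J" Y)) t
        then some (PySem.Int.toStr t) else none)
    = pvHits X Y 0 ((0, 0) :: pvTraj (0, 0) steps) := by
  have hpred : ∀ t : Int,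
      (if PySem.Set.contains (PySem.Set.ofList (pvAxisHits steps "S" "J" Y)) t
        then some (PySem.Int.toStr t) else none)
      = (if t ∈ aHits Y 0 (0 :: aTraj "S" "J" 0 steps) then some (PySem.Int.toStr t) else none) := by
    intro t
    by_cases h : t ∈ aHits Y 0 (0 :: aTraj "S" "J" 0 steps)
    · simp [pvAxisHits_eq, h]
    · simp [pvAxisHits_eq, h]
  rw [List.filterMap_congr (fun t _ => hpred t), pvAxisHits_eq]
  have hzip : ((0 : Int) :: aTraj "I" "Z" 0 steps).zip ((0 : Int) :: aTraj "S" "J" 0 steps)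
      = ((0 : Int), (0 : Int)) :: pvTraj (0, 0) steps := by
    rw [List.zip_cons_cons, pvTraj_zip (0, 0) steps]
  rw [← hzip]
  apply pvFilterInter
  simp [aTraj_length]

-- A's pvHits yields A's time-0 prefix plus the rest
theorem pvHits_cons_zero (X Y : Int) (ps : List (Int × Int)) :
    pvHits X Y 0 (((0 : Int), (0 : Int)) :: ps)
    = (if ((0 : Int) - X).natAbs ≤ 1 ∧ ((0 : Int) - Y).natAbs ≤ 1
        then ([] : List String) ++ ["0"] else []) ++ pvHits X Y 1 ps := by
  simp only [pvHits, zero_add, show PySem.Int.toStr 0 = "0" from rfl]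
  by_cases h : ((0 : Int) - X).natAbs ≤ 1 ∧ ((0 : Int) - Y).natAbs ≤ 1 <;> simp [h]

-- ===== VERDICT (by name: the statement is the Claim_ definition above) =====
theorem solve_spec : Claim_equal_solve := by
  intro X Y K route _ hpre
  unfold Pre_solve at hpre
  unfold Spec_solve solve solve_alt
  dsimp only []
  have hmax : max K 0 = ((K.toNat : Nat) : Int) := by omega
  have hrange0 : PySem.List.pyRange 0 K 1
      = PySem.List.pyRange ((0 : Nat) : Int) (((0 : Nat) : Int) + ((K.toNat : Nat) : Int)) 1 := by
    by_cases h : 0 ≤ K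
    · congr 1 <;> omega
    · rw [PySem.List.pyRange_one_eq_nil (by omega), PySem.List.pyRange_one_eq_nil (by omega)]
  obtain ⟨q, hq⟩ := pvFoldA X Y route K.toNat 0
    (if ((0 : Int) - X).natAbs ≤ 1 ∧ ((0 : Int) - Y).natAbs ≤ 1 then ([] : List String) ++ ["0"] else [])
    ((0 : Int), (0 : Int)) (by omega)
  rw [hmax, PySem.List.slice_to_natCast, hrange0, hq, pvB_hits X Y (route.take K.toNat),
      pvHits_cons_zero]
  simp only [List.drop_zero, Nat.cast_zero, zero_add]
  by_cases h : (if ((0 : Int) - X).natAbs ≤ 1 ∧ ((0 : Int) - Y).natAbs ≤ 1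
      then ([] : List String) ++ ["0"] else []) ++ pvHits X Y 1 (pvTraj (0, 0) (route.take K.toNat)) = [] <;>
    simp only [h, if_true, if_false] <;> simp_all
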